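-- pv_equiv track=rewrite | github.com/jnicoben/algoritmos_2024 | TP1.py | usar_la_fuerza
-- ===== SOURCE A (Python) =====
-- def usar_la_fuerza(mochila, indice=0):
--     if indice >= len(mochila):
--         # No quedan más objetos en la mochila
--         return -1
--
--     objeto_actual = mochila[indice]
--     if objeto_actual == "sable de luz":
--         # Encontramos un sable de luz
--         return indice
--     else:
--         # Seguimos buscando
--         return usar_la_fuerza(mochila, indice + 1)
-- ===== SOURCE B (Python) =====
-- def usar_la_fuerza(mochila, indice=0):
--     for i in range(indice, len(mochila)):
--         if mochila[i] == "sable de luz":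
--             return i
--     return -1
-- ===== Notes on version B (the rewrite author's own statement) =====
-- stated objective: simpler
-- what changed: Replaces the recursive descent (one call frame per item) with a single iterative for-loop over range(indice, len(mochila)) with early return.
import Mathlib
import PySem

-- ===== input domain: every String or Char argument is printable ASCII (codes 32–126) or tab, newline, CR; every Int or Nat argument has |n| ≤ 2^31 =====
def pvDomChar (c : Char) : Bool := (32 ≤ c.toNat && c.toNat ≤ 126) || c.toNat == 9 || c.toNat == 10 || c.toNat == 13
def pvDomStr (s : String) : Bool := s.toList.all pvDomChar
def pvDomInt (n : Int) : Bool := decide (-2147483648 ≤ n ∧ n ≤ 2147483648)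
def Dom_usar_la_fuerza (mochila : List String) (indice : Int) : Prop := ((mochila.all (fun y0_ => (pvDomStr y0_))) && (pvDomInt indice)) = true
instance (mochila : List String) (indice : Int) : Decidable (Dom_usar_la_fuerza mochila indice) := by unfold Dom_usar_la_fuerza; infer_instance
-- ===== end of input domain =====

-- B replaces A's recursive descent with a single iterative loop over range(indice, len(mochila)); simpler (O(1) stack), same values.

-- ===== PORT A =====
-- Literal port of A's recursion; the `none` branch of pyGet? is Python's IndexError, excluded by Pre_.
def usar_la_fuerza (mochila : List String) (indice : Int) : Int :=
  if _h : indice ≥ (mochila.length : Int) then -1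
  else
    match PySem.List.pyGet? mochila indice with
    | none => 0  -- IndexError in Python (indice < -len); outside Pre_
    | some objeto_actual =>
      if objeto_actual = "sable de luz" then indice
      else usar_la_fuerza mochila (indice + 1)
termination_by ((mochila.length : Int) - indice).toNat
decreasing_by omega

-- ===== PORT B =====
-- B's for-loop over range(indice, len(mochila)) with early return.
def usarAltLoop (mochila : List String) : List Int → Int
  | [] => -1
  | i :: rest =>
    match PySem.List.pyGet? mochila i with
    | none => 0  -- IndexError in Python; outside Pre_
    | some obj => if obj = "sable de luz" then i else usarAltLoop mochila rest

def usar_la_fuerza_alt (mochila : List String) (indice : Int) : Int :=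
  usarAltLoop mochila (PySem.List.pyRange indice (mochila.length : Int) 1)

-- ===== PRECONDITION & SPEC =====
-- Pre_ excludes exactly the inputs where Python A raises IndexError (indice below -len(mochila)); B raises there too.
def Pre_usar_la_fuerza (mochila : List String) (indice : Int) : Prop :=
  -(mochila.length : Int) ≤ indice
instance (mochila : List String) (indice : Int) : Decidable (Pre_usar_la_fuerza mochila indice) := by unfold Pre_usar_la_fuerza; infer_instance

def pvWitness_usar_la_fuerza : List String × Int := (["x", "sable de luz"], 0)

def Spec_usar_la_fuerza (mochila : List String) (indice : Int) (out : Int) : Prop := out = usar_la_fuerza_alt mochila indice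
instance (mochila : List String) (indice : Int) (out : Int) : Decidable (Spec_usar_la_fuerza mochila indice out) := by unfold Spec_usar_la_fuerza; infer_instance

-- ===== CLAIM (what is proved, stated in full; the proofs are below) =====
def Claim_equal_usar_la_fuerza : Prop := ∀ (mochila : List String) (indice : Int), Dom_usar_la_fuerza mochila indice → Pre_usar_la_fuerza mochila indice → Spec_usar_la_fuerza mochila indice (usar_la_fuerza mochila indice)

-- ===== LEMMAS AND PROOFS =====
theorem usar_eq_alt (mochila : List String) (indice : Int)
    (hpre : -(mochila.length : Int) ≤ indice) :
    usar_la_fuerza mochila indice = usar_la_fuerza_alt mochila indice := by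
  unfold usar_la_fuerza_alt
  by_cases h : indice ≥ (mochila.length : Int)
  · rw [usar_la_fuerza, dif_pos h, PySem.List.pyRange_one_eq_nil h, usarAltLoop]
  · push Not at h
    rw [usar_la_fuerza, dif_neg (by omega), PySem.List.pyRange_one_cons h, usarAltLoop]
    cases hg : PySem.List.pyGet? mochila indice with
    | none => simp
    | some obj =>
      simp only []
      split
      · rfl
      · have := usar_eq_alt mochila (indice + 1) (by omega)
        unfold usar_la_fuerza_alt at this
        exact this
termination_by ((mochila.length : Int) - indice).toNat
decreasing_by omega

-- ===== VERDICT (by name: the statement is the Claim_ definition above) =====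
theorem usar_la_fuerza_spec : Claim_equal_usar_la_fuerza := by
  intro mochila indice _ hpre
  exact usar_eq_alt mochila indice hpre
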